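-- pv_equiv track=rewrite | github.com/cailindelgado/csse1001-a1 | a1.py | find_recipe
-- ===== SOURCE A (Python) =====
-- def find_recipe(recipe_name: str, recipes: list[tuple[str, str]]) -> tuple[str, str] | None:
--     """This function find and returns a recipe with a given recipe_name if it cannot be found returns None
--     """
--     check_for_similarity_counter = 0
--     for item in recipes:
--         if recipe_name not in item:
--             check_for_similarity_counter += 1
--
--     if check_for_similarity_counter == len(recipes):
--         return None
--
--     for pos, item in enumerate(recipes):
--         if recipe_name in item:
--            return recipes[pos]
-- ===== SOURCE B (Python) =====
-- def find_recipe(recipe_name: str, recipes: list[tuple[str, str]]) -> tuple[str, str] | None: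
--     """Return the first recipe tuple containing recipe_name, else None."""
--     return next((item for item in recipes if recipe_name in item), None)
-- ===== Notes on version B (the rewrite author's own statement) =====
-- stated objective: simpler
-- what changed: Replaced A's two passes (a counting pass over all recipes followed by an enumerate-and-index scan) by a single linear search returning the first matching tuple directly (next on a generator).
import Mathlib
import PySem

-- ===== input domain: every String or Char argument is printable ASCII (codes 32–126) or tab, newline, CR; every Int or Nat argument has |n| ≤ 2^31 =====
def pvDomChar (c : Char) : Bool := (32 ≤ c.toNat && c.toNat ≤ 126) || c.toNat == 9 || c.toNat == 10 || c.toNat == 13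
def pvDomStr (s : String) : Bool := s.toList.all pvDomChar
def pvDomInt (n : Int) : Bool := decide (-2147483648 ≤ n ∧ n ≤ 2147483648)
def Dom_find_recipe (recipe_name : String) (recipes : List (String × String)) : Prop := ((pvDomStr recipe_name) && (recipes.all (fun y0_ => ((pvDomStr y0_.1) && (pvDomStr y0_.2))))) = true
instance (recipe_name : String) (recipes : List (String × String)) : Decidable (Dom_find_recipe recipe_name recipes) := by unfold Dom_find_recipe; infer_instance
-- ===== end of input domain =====

-- B replaces A's counting pass + enumerate/index scan by one linear search (simpler; return value only).
-- ===== PORT A =====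
-- the second 'for pos, item in enumerate(recipes): if …: return recipes[pos]' loop;
-- recipes[pos] is ported with pyGet? (exact: pos is a valid enumerate index, so it never raises)
def find_recipe_loop (recipe_name : String) (orig : List (String × String)) :
    List (Int × (String × String)) → Option (String × String)
  | [] => none
  | (pos, item) :: rest =>
    if recipe_name = item.1 ∨ recipe_name = item.2 then PySem.List.pyGet? orig pos
    else find_recipe_loop recipe_name orig rest

def find_recipe (recipe_name : String) (recipes : List (String × String)) : Option (String × String) :=
  let check_for_similarity_counter :=
    recipes.foldl
      (fun acc item => if ¬ (recipe_name = item.1 ∨ recipe_name = item.2) then acc + 1 else acc)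
      (0 : Nat)
  if check_for_similarity_counter = recipes.length then none
  else find_recipe_loop recipe_name recipes (PySem.List.enumerate recipes 0)

-- ===== PORT B =====
def find_recipe_alt (recipe_name : String) (recipes : List (String × String)) : Option (String × String) :=
  recipes.find? (fun item => recipe_name == item.1 || recipe_name == item.2)

-- ===== PRECONDITION & SPEC =====
def Spec_find_recipe (recipe_name : String) (recipes : List (String × String)) (out : Option (String × String)) : Prop := out = find_recipe_alt recipe_name recipes
instance (recipe_name : String) (recipes : List (String × String)) (out : Option (String × String)) : Decidable (Spec_find_recipe recipe_name recipes out) := by unfold Spec_find_recipe; infer_instance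

-- ===== CLAIM (what is proved, stated in full; the proofs are below) =====
def Claim_equal_find_recipe : Prop := ∀ (recipe_name : String) (recipes : List (String × String)), Dom_find_recipe recipe_name recipes → Spec_find_recipe recipe_name recipes (find_recipe recipe_name recipes)

-- ===== LEMMAS AND PROOFS =====

-- ===== VERDICT (by name: the statement is the Claim_ definition above) =====
theorem counter_eq_countP (n : String) (rs : List (String × String)) (a : Nat) :
    rs.foldl (fun acc item => if ¬ (n = item.1 ∨ n = item.2) then acc + 1 else acc) a
      = a + rs.countP (fun item => !(n == item.1 || n == item.2)) := by
  induction rs generalizing a with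
  | nil => simp
  | cons x xs ih =>
    simp only [List.foldl_cons, List.countP_cons, ih]
    by_cases h : n = x.1 ∨ n = x.2
    · rcases h with h1 | h1 <;> simp [h1]
    · rw [not_or] at h
      simp [h.1, h.2]
      omega

theorem loop_eq_find? (n : String) (orig : List (String × String))
    (l : List (Int × (String × String)))
    (h : ∀ p ∈ l, PySem.List.pyGet? orig p.1 = some p.2) :
    find_recipe_loop n orig l
      = (l.map Prod.snd).find? (fun item => n == item.1 || n == item.2) := by
  induction l with
  | nil => rfl
  | cons p rest ih =>
    obtain ⟨pos, item⟩ := p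
    simp only [find_recipe_loop, List.map_cons, List.find?_cons]
    by_cases hm : n = item.1 ∨ n = item.2
    · have : (n == item.1 || n == item.2) = true := by
        rcases hm with h1 | h1 <;> simp [h1]
      simp [hm, this, h (pos, item) (by simp)]
    · have : (n == item.1 || n == item.2) = false := by
        simp only [Bool.or_eq_false_iff, beq_eq_false_iff_ne]
        exact ⟨fun h1 => hm (Or.inl h1), fun h2 => hm (Or.inr h2)⟩
      simp [hm, this, ih (fun q hq => h q (by simp [hq]))]

theorem find_recipe_spec : Claim_equal_find_recipe := by
  intro n rs _
  unfold Spec_find_recipe find_recipe find_recipe_alt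
  rw [counter_eq_countP]
  simp only [Nat.zero_add]
  by_cases hc : rs.countP (fun item => !(n == item.1 || n == item.2)) = rs.length
  · rw [if_pos hc]
    symm
    rw [List.find?_eq_none]
    intro x hx
    have := List.countP_eq_length.mp hc x hx
    simp_all
  · rw [if_neg hc, loop_eq_find? n rs _ ?_, PySem.List.map_snd_enumerate]
    intro p hp
    rw [PySem.List.mem_enumerate_iff] at hp
    obtain ⟨k, hk, rfl⟩ := hp
    simp [hk]
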